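-- pv_equiv track=rewrite | github.com/satoshun-example/algorithm-ari | python/2-2-2_test.py | section2
-- ===== SOURCE A (Python) =====
-- def section2(n, s, t):
--     count = 0
--     current = 0
--     while True:
--         next_pos = None
--         for i in range(n):
--             if s[i] >= current:
--                 if next_pos is None or next_pos > t[i]:
--                     next_pos = t[i]
--         if next_pos is None:
--             break
--         current = next_pos
--         count += 1
--     return count
-- ===== SOURCE B (Python) =====
-- def section2(n, s, t):
--     pairs = sorted(zip(s[:max(n, 0)], t[:max(n, 0)]), key=lambda p: p[0])
--     m = len(pairs)
--     ss = [p[0] for p in pairs]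
--     ts = [p[1] for p in pairs]
--     # suffix minima: suf[j] = min(ts[j:])
--     suf = [0] * m
--     for j in range(m - 1, -1, -1):
--         suf[j] = ts[j] if j == m - 1 else min(ts[j], suf[j + 1])
--     count = 0
--     current = 0
--     while True:
--         # first index with ss[k] >= current, by binary search
--         lo, hi = 0, m
--         while lo < hi:
--             mid = (lo + hi) // 2
--             if ss[mid] < current:
--                 lo = mid + 1
--             else:
--                 hi = mid
--         if lo == m:
--             break
--         current = suf[lo]
--         count += 1
--     return count
-- ===== Notes on version B (the rewrite author's own statement) =====
-- stated objective: alternative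
-- what changed: Instead of rescanning all n intervals on every greedy round, B sorts the intervals by start once, precomputes suffix minima of the ends, and binary-searches the eligibility threshold each round.
-- outside the precondition, e.g. on section2(1, [-5], [-10]): A returns 0, B returns 0; on section2(1, [-5], []): A returns 0, B returns 0
import Mathlib
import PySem

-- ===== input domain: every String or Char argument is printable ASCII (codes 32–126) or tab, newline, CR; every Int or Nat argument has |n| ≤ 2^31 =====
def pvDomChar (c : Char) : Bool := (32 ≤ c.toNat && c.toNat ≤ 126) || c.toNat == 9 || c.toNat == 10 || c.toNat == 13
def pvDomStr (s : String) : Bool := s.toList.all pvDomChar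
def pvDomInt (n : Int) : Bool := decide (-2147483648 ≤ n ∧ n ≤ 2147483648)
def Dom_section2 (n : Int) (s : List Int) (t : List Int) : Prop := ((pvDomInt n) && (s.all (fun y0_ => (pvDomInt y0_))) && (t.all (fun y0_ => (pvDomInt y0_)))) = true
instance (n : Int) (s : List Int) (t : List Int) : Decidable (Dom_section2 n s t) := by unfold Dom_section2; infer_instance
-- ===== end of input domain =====

-- B re-implements the greedy jump count by sorting the intervals by start once, precomputing
-- suffix minima of the ends, and binary-searching the eligibility threshold each round,
-- instead of A's full scan of all n intervals every round. Objective: alternative algorithm.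

-- ===== PORT A =====
-- one pass of A's inner `for i in range(n)` loop body
def pvAFold (s t : List Int) (current : Int) (np : Option Int) (i : Nat) : Option Int :=
  match PySem.List.pyGet? s (i : Int) with
  | none => np                       -- IndexError: outside Pre_
  | some si =>
    if current ≤ si then
      match PySem.List.pyGet? t (i : Int) with
      | none => np                   -- IndexError: outside Pre_
      | some ti =>
        match np with
        | none => some ti
        | some v => if ti < v then some ti else np
    else np

-- A's `while True` loop; the fuel argument only makes the loop total (inside Pre_ the
-- loop breaks within n rounds, so fuel n+1 is never exhausted).
def pvALoop (n : Nat) (s t : List Int) : Nat → Int → Int → Int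
  | 0, _, count => count
  | fuel+1, current, count =>
    match (List.range n).foldl (pvAFold s t current) none with
    | none => count
    | some next => pvALoop n s t fuel next (count + 1)

def section2 (n : Int) (s : List Int) (t : List Int) : Int :=
  pvALoop n.toNat s t (n.toNat + 1) 0 0

-- ===== PORT B =====
-- B's inner binary search: first index k in [lo,hi) with ss[k] >= x (ss sorted)
def pvBisect (ss : List Int) (x : Int) (lo hi : Nat) : Nat :=
  if h : lo < hi then
    let mid := (lo + hi) / 2
    if ss.getD mid 0 < x then pvBisect ss x (mid + 1) hi else pvBisect ss x lo mid
  else lo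
termination_by hi - lo
decreasing_by all_goals omega

-- B's right-to-left suffix-minima build: (pvSufMin ts)[j] = min(ts[j:])
def pvSufMin : List Int → List Int
  | [] => []
  | x :: rest =>
    match pvSufMin rest with
    | [] => [x]
    | y :: ys => min x y :: y :: ys

-- B's `while True` loop; fuel only makes it total (inside Pre_ it breaks within m rounds).
def pvBLoop (m : Nat) (ss suf : List Int) : Nat → Int → Int → Int
  | 0, _, count => count
  | fuel+1, current, count =>
    let k := pvBisect ss current 0 m
    if k = m then count
    else pvBLoop m ss suf fuel (suf.getD k 0) (count + 1)

def section2_alt (n : Int) (s : List Int) (t : List Int) : Int :=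
  let pairs := PySem.List.sorted ((s.take n.toNat).zip (t.take n.toNat)) (fun p => p.1) false
  let m := pairs.length
  let ss := pairs.map Prod.fst
  let ts := pairs.map Prod.snd
  let suf := pvSufMin ts
  pvBLoop m ss suf (m + 1) 0 0

-- ===== PRECONDITION & SPEC =====
-- Pre_ excludes n larger than either list (A raises IndexError once an index is reached)
-- and interval lists with some s[i] >= t[i], on which A's greedy loop can run forever.
def Pre_section2 (n : Int) (s : List Int) (t : List Int) : Prop :=
  n ≤ s.length ∧ n ≤ t.length ∧
  ∀ i : Nat, i < n.toNat → s.getD i 0 < t.getD i 0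
instance (n : Int) (s : List Int) (t : List Int) : Decidable (Pre_section2 n s t) := by
  unfold Pre_section2; infer_instance

def pvWitness_section2 : Int × List Int × List Int := (3, [0, 3, 1], [2, 7, 4])

def Spec_section2 (n : Int) (s : List Int) (t : List Int) (out : Int) : Prop := out = section2_alt n s t
instance (n : Int) (s : List Int) (t : List Int) (out : Int) : Decidable (Spec_section2 n s t out) := by unfold Spec_section2; infer_instance

-- ===== CLAIM (what is proved, stated in full; the proofs are below) =====
def Claim_equal_section2 : Prop := ∀ (n : Int) (s : List Int) (t : List Int), Dom_section2 n s t → Pre_section2 n s t → Spec_section2 n s t (section2 n s t)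

-- ===== LEMMAS AND PROOFS =====

-- the running-minimum step of A's inner loop, isolated
def pvMinStep (np : Option Int) (ti : Int) : Option Int :=
  match np with
  | none => some ti
  | some v => if ti < v then some ti else np

-- minimum of a list computed by that step (A's next_pos over the eligible list)
def pvOmin (l : List Int) : Option Int := l.foldl pvMinStep none

-- the t-values of the eligible intervals among the first m, in order
def pvElig (s t : List Int) (m : Nat) (current : Int) : List Int :=
  (((s.take m).zip (t.take m)).filter (fun p => decide (current ≤ p.1))).map Prod.snd

lemma pvMinStep_some (v ti : Int) : pvMinStep (some v) ti = some (min v ti) := by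
  simp only [pvMinStep, min_def]
  split_ifs <;> (first | rfl | omega)

lemma foldl_pvMinStep_some (l : List Int) (v : Int) :
    l.foldl pvMinStep (some v) = some (l.foldl min v) := by
  induction l generalizing v with
  | nil => rfl
  | cons x xs ih => simp [List.foldl, pvMinStep_some, ih]

lemma pvOmin_cons (x : Int) (l : List Int) :
    pvOmin (x :: l) = some (l.foldl min x) := by
  simp [pvOmin, List.foldl, pvMinStep, foldl_pvMinStep_some]

lemma foldl_min_mem (l : List Int) (x : Int) : l.foldl min x = x ∨ l.foldl min x ∈ l := by
  induction l generalizing x with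
  | nil => left; rfl
  | cons y ys ih =>
    simp only [List.foldl, List.mem_cons]
    rcases ih (min x y) with h | h
    · rcases min_choice x y with hc | hc
      · left; rw [h, hc]
      · right; left; rw [h, hc]
    · right; right; exact h
lemma foldl_min_le (l : List Int) (x : Int) :
    l.foldl min x ≤ x ∧ ∀ y ∈ l, l.foldl min x ≤ y := by
  induction l generalizing x with
  | nil => exact ⟨le_refl _, by simp⟩
  | cons z zs ih =>
    obtain ⟨h1, h2⟩ := ih (min x z)
    refine ⟨le_trans h1 (min_le_left _ _), ?_⟩
    intro y hy
    rcases hy with _ | hy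
    · exact le_trans h1 (min_le_right _ _)
    · exact h2 _ (by assumption)

lemma pvOmin_eq_none (l : List Int) : pvOmin l = none ↔ l = [] := by
  cases l with
  | nil => simp [pvOmin]
  | cons x xs => simp [pvOmin_cons]

lemma pvOmin_eq_some (l : List Int) (v : Int) :
    pvOmin l = some v ↔ v ∈ l ∧ ∀ y ∈ l, v ≤ y := by
  cases l with
  | nil => simp [pvOmin]
  | cons x xs =>
    rw [pvOmin_cons]
    obtain ⟨hle, hall⟩ := foldl_min_le xs x
    constructor
    · intro h
      have hv : xs.foldl min x = v := Option.some_inj.mp h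
      subst hv
      refine ⟨?_, ?_⟩
      · rcases foldl_min_mem xs x with hm | hm
        · rw [hm]; exact List.mem_cons_self
        · exact List.mem_cons_of_mem _ hm
      · intro y hy
        rcases List.mem_cons.mp hy with rfl | hy
        · exact hle
        · exact hall y hy
    · rintro ⟨hv, hrest⟩
      have h1 : v ≤ xs.foldl min x := by
        rcases foldl_min_mem xs x with hm | hm
        · rw [hm]; exact hrest x List.mem_cons_self
        · exact hrest _ (List.mem_cons_of_mem _ hm)
      have h2 : xs.foldl min x ≤ v := by
        rcases List.mem_cons.mp hv with rfl | hv
        · exact hle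
        · exact hall v hv
      rw [le_antisymm h2 h1]

lemma pvOmin_perm {l l' : List Int} (h : l.Perm l') : pvOmin l = pvOmin l' := by
  cases hl : pvOmin l' with
  | none =>
    rw [pvOmin_eq_none] at hl ⊢
    subst hl
    exact List.perm_nil.mp h
  | some v =>
    rw [pvOmin_eq_some] at hl ⊢
    exact ⟨h.mem_iff.mpr hl.1, fun y hy => hl.2 y (h.mem_iff.mp hy)⟩

-- A's inner for-loop computes the running minimum over the eligible t-values
lemma aFold_eq_elig (s t : List Int) (current : Int) (m : Nat)
    (hs : m ≤ s.length) (ht : m ≤ t.length) (a : Option Int) :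
    (List.range m).foldl (pvAFold s t current) a = (pvElig s t m current).foldl pvMinStep a := by
  induction m generalizing a with
  | zero => simp [pvElig]
  | succ k ih =>
    have hks : k < s.length := by omega
    have hkt : k < t.length := by omega
    rw [List.range_succ, List.foldl_append]
    rw [ih (by omega) (by omega)]
    have hzip : (s.take (k+1)).zip (t.take (k+1)) =
        (s.take k).zip (t.take k) ++ [(s[k], t[k])] := by
      have h1 : s.take (k+1) = s.take k ++ [s[k]] := by
        rw [List.take_add_one]
        simp [List.getElem?_eq_getElem hks]
      have h2 : t.take (k+1) = t.take k ++ [t[k]] := by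
        rw [List.take_add_one]
        simp [List.getElem?_eq_getElem hkt]
      rw [h1, h2, List.zip_append (by simp; omega)]
      simp
    have hfold : ∀ b, pvAFold s t current b k =
        ((if decide (current ≤ s[k]) then [t[k]] else []).foldl pvMinStep b) := by
      intro b
      simp only [pvAFold, PySem.List.pyGet?_natCast,
        List.getElem?_eq_getElem hks, List.getElem?_eq_getElem hkt]
      by_cases hc : current ≤ s[k]
      · simp [hc, pvMinStep]
      · simp [hc]
    simp only [List.foldl_cons, List.foldl_nil]
    rw [hfold]
    simp only [pvElig, hzip, List.filter_append, List.map_append, List.foldl_append]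
    by_cases hc : current ≤ s[k] <;> simp [hc]

-- the binary search finds exactly the threshold index in a sorted list
lemma bisect_char (ss : List Int) (x : Int) :
    ∀ (d lo hi : Nat), hi - lo ≤ d → hi ≤ ss.length → lo ≤ hi →
    (∀ i j : Nat, i ≤ j → j < ss.length → ss.getD i 0 ≤ ss.getD j 0) →
    (∀ j, j < lo → j < ss.length → ss.getD j 0 < x) →
    (∀ j, hi ≤ j → j < ss.length → x ≤ ss.getD j 0) →
    pvBisect ss x lo hi ≤ hi ∧
    ∀ j, j < ss.length → (ss.getD j 0 < x ↔ j < pvBisect ss x lo hi) := by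
  intro d
  induction d with
  | zero =>
    intro lo hi hd hhi hlo hmono hbelow habove
    have heq : lo = hi := by omega
    subst heq
    rw [pvBisect, dif_neg (by omega)]
    refine ⟨le_refl _, fun j hj => ⟨fun hlt => ?_, fun hjlo => hbelow j hjlo hj⟩⟩
    by_contra hge
    have := habove j (by omega) hj
    omega
  | succ d ih =>
    intro lo hi hd hhi hlo hmono hbelow habove
    by_cases h : lo < hi
    · rw [pvBisect, dif_pos h]
      by_cases hcmp : ss.getD ((lo + hi) / 2) 0 < x
      · simp only [if_pos hcmp]
        obtain ⟨h1, h2⟩ := ih ((lo + hi) / 2 + 1) hi (by omega) hhi (by omega) hmono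
          (fun j hj hjl => lt_of_le_of_lt (hmono j ((lo + hi) / 2) (by omega) (by omega)) hcmp)
          habove
        exact ⟨h1, h2⟩
      · simp only [if_neg hcmp]
        obtain ⟨h1, h2⟩ := ih lo ((lo + hi) / 2) (by omega) (by omega) (by omega) hmono hbelow
          (fun j hj hjl => le_trans (by omega) (hmono ((lo + hi) / 2) j hj hjl))
        exact ⟨by omega, h2⟩
    · rw [pvBisect, dif_neg h]
      have heq : lo = hi := by omega
      subst heq
      refine ⟨le_refl _, fun j hj => ⟨fun hlt => ?_, fun hjlo => hbelow j hjlo hj⟩⟩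
      by_contra hge
      have := habove j (by omega) hj
      omega

lemma pvSufMin_length (ts : List Int) : (pvSufMin ts).length = ts.length := by
  induction ts with
  | nil => rfl
  | cons x rest ih =>
    simp only [pvSufMin]
    cases h : pvSufMin rest with
    | nil => simp_all
    | cons y ys => simp_all

lemma pvSufMin_getD (ts : List Int) (k : Nat) (hk : k < ts.length) :
    pvOmin (ts.drop k) = some ((pvSufMin ts).getD k 0) := by
  induction ts generalizing k with
  | nil => simp at hk
  | cons x rest ih =>
    cases k with
    | zero =>
      simp only [List.drop_zero]
      cases hr : pvSufMin rest with
      | nil =>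
        have : rest = [] := by
          have := pvSufMin_length rest
          rw [hr] at this
          exact List.length_eq_zero_iff.mp this.symm
        subst this
        simp [pvSufMin, pvOmin_cons]
      | cons y ys =>
        have hrlen : 0 < rest.length := by
          have := pvSufMin_length rest; rw [hr] at this; simp at this; omega
        have hrest : pvOmin rest = some y := by
          have := ih 0 hrlen
          simpa [hr] using this
        rw [pvOmin_cons]
        have : rest.foldl min x = min x y := by
          rw [pvOmin_eq_some] at hrest
          obtain ⟨hle, hall'⟩ := foldl_min_le rest x
          rcases foldl_min_mem rest x with hm | hm
          · have h1 : rest.foldl min x ≤ y := hall' y hrest.1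
            have h2 : x ≤ y := by rw [← hm]; exact h1
            have h3 : rest.foldl min x = x := hm
            simp [min_eq_left h2, h3]
          · have h1 : y ≤ rest.foldl min x := hrest.2 _ hm
            have h2 : rest.foldl min x ≤ y := hall' y hrest.1
            have h3 : rest.foldl min x = y := by omega
            have h4 : y ≤ x := by rw [← h3]; exact hle
            simp [min_eq_right h4, h3]
        simp [pvSufMin, hr, this]
    | succ k' =>
      have hk' : k' < rest.length := by simpa using hk
      rw [List.drop_succ_cons, ih k' hk']
      simp only [pvSufMin]
      cases hr : pvSufMin rest with
      | nil =>
        have := pvSufMin_length rest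
        rw [hr] at this
        have : rest = [] := List.length_eq_zero_iff.mp this.symm
        subst this; simp at hk'
      | cons y ys => simp

-- filter = drop when the predicate is false exactly on the first k elements
lemma filter_eq_drop {α : Type} (p : α → Bool) (l : List α) (k : Nat) (hk : k ≤ l.length)
    (hlo : ∀ j (h : j < l.length), j < k → ¬ p l[j])
    (hhi : ∀ j (h : j < l.length), k ≤ j → p l[j]) :
    l.filter p = l.drop k := by
  induction l generalizing k with
  | nil => simp
  | cons x xs ih =>
    cases k with
    | zero =>
      rw [List.drop_zero]
      apply List.filter_eq_self.mpr
      intro a ha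
      obtain ⟨i, hi, rfl⟩ := List.mem_iff_getElem.mp ha
      exact hhi i hi (by omega)
    | succ k' =>
      have hx : ¬ p x := hlo 0 (by simp) (by omega)
      rw [List.filter_cons_of_neg (by simpa using hx), List.drop_succ_cons]
      exact ih k' (by simpa using hk)
        (fun j hj hjk => hlo (j+1) (by simpa using hj) (by omega))
        (fun j hj hjk => hhi (j+1) (by simpa using hj) (by omega))

-- the sorted pair list B works on
def pvPairs (n : Int) (s t : List Int) : List (Int × Int) :=
  PySem.List.sorted ((s.take n.toNat).zip (t.take n.toNat)) (fun p => p.1) false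

-- the single-round agreement: A's scan result = B's bisect + suffix-min lookup
lemma step_agree (n : Int) (s t : List Int)
    (hs : n ≤ (s.length : Int)) (ht : n ≤ (t.length : Int)) (current : Int) :
    (List.range n.toNat).foldl (pvAFold s t current) none =
      (if pvBisect ((pvPairs n s t).map Prod.fst) current 0 (pvPairs n s t).length = (pvPairs n s t).length
       then none
       else some ((pvSufMin ((pvPairs n s t).map Prod.snd)).getD
         (pvBisect ((pvPairs n s t).map Prod.fst) current 0 (pvPairs n s t).length) 0)) := by
  have hsn : n.toNat ≤ s.length := by omega
  have htn : n.toNat ≤ t.length := by omega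
  set zp := (s.take n.toNat).zip (t.take n.toNat) with hzp
  set pairs := pvPairs n s t with hpairs
  have hperm : pairs.Perm zp := PySem.List.sorted_perm zp (fun p => p.1) false
  set m := pairs.length with hm
  set ss := pairs.map Prod.fst with hss
  set k := pvBisect ss current 0 m with hk
  -- ss is sorted nondecreasing
  have hpw : pairs.Pairwise (fun a b => a.1 ≤ b.1) :=
    PySem.List.sorted_pairwise zp (fun p => p.1)
  -- (pvPairs unfolds to the sorted zip definitionally)
  have hsslen : ss.length = m := by simp [hss, hm]
  have hmono : ∀ i j : Nat, i ≤ j → j < ss.length → ss.getD i 0 ≤ ss.getD j 0 := by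
    intro i j hij hj
    rcases eq_or_lt_of_le hij with rfl | hij'
    · exact le_refl _
    · have hi : i < pairs.length := by simp [hss] at hj; omega
      have hj' : j < pairs.length := by simp [hss] at hj; exact hj
      have := (List.pairwise_iff_getElem.mp hpw) i j hi hj' hij'
      simp only [hss, List.getD_eq_getElem?_getD, List.getElem?_map,
        List.getElem?_eq_getElem hi, List.getElem?_eq_getElem hj']
      simpa using this
  obtain ⟨hkle, hchar⟩ := bisect_char ss current m 0 m (by omega) (by omega) (by omega) hmono
    (by omega) (by intro j hj hjl; rw [hsslen] at hjl; omega)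
  -- A's fold = min over eligible list
  rw [aFold_eq_elig s t current n.toNat hsn htn none]
  change pvOmin (pvElig s t n.toNat current) = _
  -- eligible list over zp is a permutation of eligible over pairs
  have hfilter : pvOmin (pvElig s t n.toNat current) =
      pvOmin ((pairs.filter (fun p => decide (current ≤ p.1))).map Prod.snd) := by
    apply pvOmin_perm
    exact ((hperm.filter _).map _).symm
  rw [hfilter]
  -- the eligible pairs are exactly the suffix from k
  have hdrop : pairs.filter (fun p => decide (current ≤ p.1)) = pairs.drop k := by
    apply filter_eq_drop _ _ k (by omega)
    · intro j hj hjk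
      have hjs : j < ss.length := by simp [hss]; exact hj
      have := (hchar j hjs).mpr hjk
      have hget : ss.getD j 0 = pairs[j].1 := by
        simp [hss, List.getD_eq_getElem?_getD, List.getElem?_eq_getElem hj]
      rw [hget] at this
      simp; omega
    · intro j hj hjk
      have hjs : j < ss.length := by simp [hss]; exact hj
      have := fun h => (hchar j hjs).mp h
      have hget : ss.getD j 0 = pairs[j].1 := by
        simp [hss, List.getD_eq_getElem?_getD, List.getElem?_eq_getElem hj]
      by_contra hc
      simp at hc
      have : j < k := (hchar j hjs).mp (by rw [hget]; omega)
      omega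
  rw [hdrop, List.map_drop]
  show pvOmin ((pairs.map Prod.snd).drop k) =
    if k = pairs.length then none else some ((pvSufMin (pairs.map Prod.snd)).getD k 0)
  by_cases hkm : k = m
  · rw [if_pos (by rw [← hm]; exact hkm)]
    have hnil : (pairs.map Prod.snd).drop k = [] :=
      List.drop_eq_nil_of_le (by simp [hkm, hm])
    rw [hnil]
    rfl
  · rw [if_neg (by rw [← hm]; exact hkm)]
    exact pvSufMin_getD (pairs.map Prod.snd) k (by simp only [List.length_map, ← hm]; omega)

-- the two fueled loops agree step by step
lemma loops_agree (nn : Nat) (s t : List Int) (m : Nat) (ss suf : List Int)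
    (hstep : ∀ current : Int, (List.range nn).foldl (pvAFold s t current) none =
      (if pvBisect ss current 0 m = m then none
       else some (suf.getD (pvBisect ss current 0 m) 0))) :
    ∀ (fuel : Nat) (current count : Int),
      pvALoop nn s t fuel current count = pvBLoop m ss suf fuel current count := by
  intro fuel
  induction fuel with
  | zero => intro current count; rfl
  | succ f ih =>
    intro current count
    rw [pvALoop, pvBLoop, hstep current]
    by_cases hkm : pvBisect ss current 0 m = m
    · simp only [if_pos hkm]
    · simp only [if_neg hkm]
      exact ih _ _

lemma length_pvPairs (n : Int) (s t : List Int)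
    (hs : n ≤ (s.length : Int)) (ht : n ≤ (t.length : Int)) :
    (pvPairs n s t).length = n.toNat := by
  rw [pvPairs, (PySem.List.sorted_perm _ _ _).length_eq]
  simp
  omega

-- ===== VERDICT (by name: the statement is the Claim_ definition above) =====
theorem section2_spec : Claim_equal_section2 := by
  intro n s t _hdom hpre
  obtain ⟨hs, ht, _⟩ := hpre
  unfold Spec_section2 section2 section2_alt
  show pvALoop n.toNat s t (n.toNat + 1) 0 0 =
    pvBLoop (pvPairs n s t).length ((pvPairs n s t).map Prod.fst)
      (pvSufMin ((pvPairs n s t).map Prod.snd)) ((pvPairs n s t).length + 1) 0 0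
  have hlen := length_pvPairs n s t hs ht
  have hstep := fun current => step_agree n s t hs ht current
  rw [hlen] at hstep ⊢
  exact loops_agree n.toNat s t n.toNat _ _ hstep (n.toNat + 1) 0 0
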